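-- pv_equiv track=rewrite | github.com/chenjinqian/py_tools | bin/app_calc_v2.py | _convert_dict_format
-- ===== SOURCE A (Python) =====
-- def _convert_dict_format(data):
--     d = {}
--     for lst in data:
--         meter_min_vrs_s, min_sec_d = lst
--         split_it = meter_min_vrs_s.split('_')
--         vr = split_it[-1]
--         keys_min_sec = min_sec_d.keys()
--         for i in keys_min_sec:
--             new_key = '%s%s' % ('_'.join(split_it[2:-1])[:-2], i)
--             if new_key in d:
--                 d[new_key] = '%s,%s=%s' % (d[new_key],
--                                            vr,
--                                            min_sec_d[i])
--             else:
--                 d[new_key] = '%s=%s' % (vr,min_sec_d[i])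
--     return d
-- ===== SOURCE B (Python) =====
-- def _convert_dict_format(data):
--     # Flatten-then-gather: first flatten everything into a list of (key, 'vr=value')
--     # records; then collect the distinct keys in first-appearance order and build each
--     # output value by one scan of the record list, with no dict maintained during the
--     # traversal and no incremental string accumulation.
--     flat = []
--     for meter_min_vrs_s, min_sec_d in data:
--         split_it = meter_min_vrs_s.split('_')
--         vr = split_it[-1]
--         pref = '_'.join(split_it[2:-1])[:-2]
--         for i in min_sec_d:
--             flat.append((pref + i, '%s=%s' % (vr, min_sec_d[i])))
--     seen = []
--     for k, _ in flat:
--         if k not in seen: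
--             seen.append(k)
--     return {k: ','.join(p for kk, p in flat if kk == k) for k in seen}
-- ===== Notes on version B (the rewrite author's own statement) =====
-- stated objective: alternative
-- what changed: Replaces A's single pass that builds the dict incrementally (membership branch plus growing string concatenation) by a flatten-then-gather strategy: flatten everything to a list of (key, 'vr=value') records, dedup the keys in first-appearance order, and build each output value by filtering the record list and joining once.
import Mathlib
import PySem

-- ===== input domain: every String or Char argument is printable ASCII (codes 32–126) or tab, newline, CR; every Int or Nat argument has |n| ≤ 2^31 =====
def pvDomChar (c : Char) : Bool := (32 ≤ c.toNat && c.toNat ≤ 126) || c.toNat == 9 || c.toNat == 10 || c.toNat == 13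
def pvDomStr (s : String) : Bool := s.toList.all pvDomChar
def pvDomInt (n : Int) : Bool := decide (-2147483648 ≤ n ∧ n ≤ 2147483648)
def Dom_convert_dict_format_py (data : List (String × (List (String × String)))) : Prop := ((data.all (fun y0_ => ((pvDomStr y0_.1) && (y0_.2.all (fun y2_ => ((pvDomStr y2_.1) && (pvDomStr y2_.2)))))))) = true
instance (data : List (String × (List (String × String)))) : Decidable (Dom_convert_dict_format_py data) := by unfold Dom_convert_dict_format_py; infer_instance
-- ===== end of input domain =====

-- B replaces A's incremental dict-building (membership branch + growing string concatenation)
-- by a flatten-then-gather strategy: flatten to (key, piece) records, dedup the keys in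
-- first-appearance order, then build each value by filtering the record list (objective: alternative).

-- ===== PORT A =====
-- '_'.join(split_it[2:-1])[:-2]  — the key-prefix expression, identical in both Pythons
def pvKeyPrefix (split_it : List String) : String :=
  PySem.Str.slice (PySem.Str.join "_" (PySem.List.slice split_it (some 2) (some (-1)))) none (some (-2))

def convert_dict_format_py (data : List (String × (List (String × String)))) : List (String × String) :=
  (data.foldl (fun d lst =>
      -- split_it = meter_min_vrs_s.split('_'): the separator "_" is nonempty, so split? is always some
      let split_it := (PySem.Str.split? lst.1 "_").getD []
      -- vr = split_it[-1]: a split result is never the empty list, so pyGet? is always some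
      let vr := (PySem.List.pyGet? split_it (-1)).getD ""
      let md := PySem.Dict.ofList lst.2
      md.keys.foldl (fun d i =>
          let new_key := pvKeyPrefix split_it ++ i
          if d.contains new_key then
            -- min_sec_d[i]: i comes from md.keys, so the lookup always succeeds; same below
            d.insert new_key (d.getD new_key "" ++ "," ++ vr ++ "=" ++ md.getD i "")
          else
            d.insert new_key (vr ++ "=" ++ md.getD i "")) d)
    PySem.Dict.empty).items

-- ===== PORT B =====
def convert_dict_format_py_alt (data : List (String × (List (String × String)))) : List (String × String) :=
  -- flat: the flattened (new_key, 'vr=value') record list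
  let flat := data.foldl (fun fl lst =>
      let split_it := (PySem.Str.split? lst.1 "_").getD []
      let vr := (PySem.List.pyGet? split_it (-1)).getD ""
      let pref := pvKeyPrefix split_it
      let md := PySem.Dict.ofList lst.2
      md.keys.foldl (fun fl i => fl ++ [(pref ++ i, vr ++ "=" ++ md.getD i "")]) fl)
    ([] : List (String × String))
  -- seen: the distinct keys in first-appearance order
  let seen := flat.foldl (fun ks (p : String × String) =>
      if ks.contains p.1 then ks else ks ++ [p.1]) ([] : List String)
  -- final dict: each value gathered by one scan of flat
  seen.map (fun k => (k, PySem.Str.join "," ((flat.filter (fun q => q.1 == k)).map Prod.snd)))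

-- ===== PRECONDITION & SPEC =====
def Spec_convert_dict_format_py (data : List (String × (List (String × String)))) (out : List (String × String)) : Prop := out = convert_dict_format_py_alt data
instance (data : List (String × (List (String × String)))) (out : List (String × String)) : Decidable (Spec_convert_dict_format_py data out) := by unfold Spec_convert_dict_format_py; infer_instance

-- ===== CLAIM =====
def Claim_equal_convert_dict_format_py : Prop := ∀ (data : List (String × (List (String × String)))), Dom_convert_dict_format_py data → Spec_convert_dict_format_py data (convert_dict_format_py data)

-- ===== LEMMAS AND PROOFS =====

-- the flattened records contributed by one outer-loop element
def pvPairsOf (lst : String × (List (String × String))) : List (String × String) :=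
  let split_it := (PySem.Str.split? lst.1 "_").getD []
  let vr := (PySem.List.pyGet? split_it (-1)).getD ""
  let md := PySem.Dict.ofList lst.2
  md.keys.map (fun i => (pvKeyPrefix split_it ++ i, vr ++ "=" ++ md.getD i ""))

-- one group (k, pieces) ↦ (k, ','.join(pieces))
def pvJoinGroup (q : String × List String) : String × String := (q.1, PySem.Str.join "," q.2)

lemma pvCharsJoin_append (sep : List Char) (l : List (List Char)) (c : List Char) (h : l ≠ []) :
    PySem.Chars.join sep (l ++ [c]) = PySem.Chars.join sep l ++ sep ++ c := by
  induction l with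
  | nil => exact absurd rfl h
  | cons a rest ih =>
    cases rest with
    | nil => simp [PySem.Chars.join_cons_cons, PySem.Chars.join_singleton]
    | cons b r =>
      have hih := ih (by simp)
      simp only [List.cons_append, PySem.Chars.join_cons_cons] at *
      rw [hih]
      simp [List.append_assoc]

lemma pvJoin_singleton (p : String) : PySem.Str.join "," [p] = p := by
  simp [PySem.Str.join, PySem.Chars.join_singleton]

lemma pvJoin_append (ps : List String) (p : String) (h : ps ≠ []) :
    PySem.Str.join "," (ps ++ [p]) = PySem.Str.join "," ps ++ "," ++ p := by
  unfold PySem.Str.join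
  rw [List.map_append, List.map_singleton,
      pvCharsJoin_append _ _ _ (by simpa using h)]
  apply String.toList_injective
  simp

lemma pvContainsRel (d : PySem.Dict String String) (g : PySem.Dict String (List String))
    (hI : d.items = g.items.map pvJoinGroup) (k : String) :
    d.contains k = g.contains k := by
  simp [PySem.Dict.contains, hI, List.any_map, Function.comp_def, pvJoinGroup]

lemma pvGetRel (d : PySem.Dict String String) (g : PySem.Dict String (List String))
    (hI : d.items = g.items.map pvJoinGroup) (k : String) :
    d.get? k = (g.get? k).map (PySem.Str.join ",") := by
  simp [PySem.Dict.get?, hI, List.find?_map, Function.comp_def, pvJoinGroup, Option.map_map]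

-- one A-step / one modify-step preserve the relation
lemma pvStep (k pc : String) (d : PySem.Dict String String) (g : PySem.Dict String (List String))
    (hI : d.items = g.items.map pvJoinGroup) (hNE : ∀ q ∈ g.items, q.2 ≠ []) :
    ((if d.contains k then d.insert k (d.getD k "" ++ "," ++ pc) else d.insert k pc).items
        = (g.modify k [] (· ++ [pc])).items.map pvJoinGroup)
    ∧ ∀ q ∈ (g.modify k [] (· ++ [pc])).items, q.2 ≠ [] := by
  have hc : d.contains k = g.contains k := pvContainsRel d g hI k
  have hmod : g.modify k [] (· ++ [pc]) = g.insert k (g.getD k [] ++ [pc]) := rfl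
  rw [hmod]
  by_cases hg : g.contains k = true
  · obtain ⟨ps, hps⟩ : ∃ ps, g.get? k = some ps := by
      rw [PySem.Dict.contains_eq_isSome_get?] at hg
      exact Option.isSome_iff_exists.mp hg
    have hmem : (k, ps) ∈ g.items := PySem.Dict.mem_items_of_get?_eq_some g hps
    have hne : ps ≠ [] := hNE _ hmem
    have hgd : g.getD k [] = ps := PySem.Dict.getD_of_get?_eq_some g [] hps
    have hdd : d.getD k "" = PySem.Str.join "," ps := by
      simp [PySem.Dict.getD, pvGetRel d g hI k, hps]
    constructor
    · rw [if_pos (hc ▸ hg), hgd,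
          PySem.Dict.items_insert_of_contains _ _ (hc ▸ hg),
          PySem.Dict.items_insert_of_contains _ _ hg,
          hI, List.map_map, List.map_map]
      apply List.map_congr_left
      intro q _
      simp only [Function.comp, pvJoinGroup]
      by_cases hq : (q.1 == k) = true
      · simp [hq, hdd, pvJoin_append ps pc hne]
      · simp [hq]
    · intro q hq
      rw [hgd, PySem.Dict.mem_items_insert] at hq
      rcases hq with h1 | ⟨h2, _⟩
      · subst h1; simp
      · exact hNE _ h2
  · have hg' : g.contains k = false := by simpa using hg
    have hd' : d.contains k = false := by rw [hc]; exact hg'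
    constructor
    · rw [if_neg (by simp [hd']),
          PySem.Dict.items_insert_of_not_contains _ _ hd',
          PySem.Dict.items_insert_of_not_contains _ _ hg',
          PySem.Dict.getD_of_not_contains _ _ hg',
          hI, List.map_append]
      simp [pvJoinGroup, pvJoin_singleton]
    · intro q hq
      rw [PySem.Dict.getD_of_not_contains _ _ hg',
          PySem.Dict.items_insert_of_not_contains _ _ hg', List.mem_append] at hq
      rcases hq with h1 | h2
      · exact hNE _ h1
      · simp at h2; subst h2; simp

-- the whole inner loop preserves the relation
lemma pvInner {α : Type} (key vr mv : α → String) (l : List α)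
    (d : PySem.Dict String String) (g : PySem.Dict String (List String))
    (hI : d.items = g.items.map pvJoinGroup) (hNE : ∀ q ∈ g.items, q.2 ≠ []) :
    ((l.foldl (fun d x =>
        if d.contains (key x) then
          d.insert (key x) (d.getD (key x) "" ++ "," ++ vr x ++ "=" ++ mv x)
        else
          d.insert (key x) (vr x ++ "=" ++ mv x)) d).items
      = (l.foldl (fun g x => g.modify (key x) [] (· ++ [vr x ++ "=" ++ mv x])) g).items.map pvJoinGroup)
    ∧ ∀ q ∈ (l.foldl (fun g x => g.modify (key x) [] (· ++ [vr x ++ "=" ++ mv x])) g).items, q.2 ≠ [] := by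
  induction l generalizing d g with
  | nil => exact ⟨hI, hNE⟩
  | cons x xs ih =>
    have hstep := pvStep (key x) (vr x ++ "=" ++ mv x) d g hI hNE
    rw [← String.append_assoc, ← String.append_assoc] at hstep
    exact ih _ _ hstep.1 hstep.2

-- A's whole nested loop, related to the plain modify-append fold over the FLATTENED record list
lemma pvOuter (data : List (String × (List (String × String))))
    (d : PySem.Dict String String) (g : PySem.Dict String (List String))
    (hI : d.items = g.items.map pvJoinGroup) (hNE : ∀ q ∈ g.items, q.2 ≠ []) :
    ((data.foldl (fun d lst =>
        let split_it := (PySem.Str.split? lst.1 "_").getD []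
        let vr := (PySem.List.pyGet? split_it (-1)).getD ""
        let md := PySem.Dict.ofList lst.2
        md.keys.foldl (fun d i =>
            let new_key := pvKeyPrefix split_it ++ i
            if d.contains new_key then
              d.insert new_key (d.getD new_key "" ++ "," ++ vr ++ "=" ++ md.getD i "")
            else
              d.insert new_key (vr ++ "=" ++ md.getD i "")) d) d).items
      = ((data.flatMap pvPairsOf).foldl
          (fun g p => g.modify p.1 [] (· ++ [p.2])) g).items.map pvJoinGroup)
    ∧ ∀ q ∈ ((data.flatMap pvPairsOf).foldl
          (fun g p => g.modify p.1 [] (· ++ [p.2])) g).items, q.2 ≠ [] := by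
  induction data generalizing d g with
  | nil => exact ⟨hI, hNE⟩
  | cons lst rest ih =>
    simp only [List.foldl_cons, List.flatMap_cons, List.foldl_append]
    have hinner := pvInner
      (fun i => pvKeyPrefix ((PySem.Str.split? lst.1 "_").getD []) ++ i)
      (fun _ => (PySem.List.pyGet? ((PySem.Str.split? lst.1 "_").getD []) (-1)).getD "")
      (fun i => (PySem.Dict.ofList lst.2).getD i "")
      (PySem.Dict.ofList lst.2).keys d g hI hNE
    rw [pvPairsOf, List.foldl_map] at *
    exact ih _ _ hinner.1 hinner.2

-- B's flat-building nested loop IS data.flatMap pvPairsOf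
lemma pvFlatEq (data : List (String × (List (String × String)))) (fl : List (String × String)) :
    data.foldl (fun fl lst =>
        let split_it := (PySem.Str.split? lst.1 "_").getD []
        let vr := (PySem.List.pyGet? split_it (-1)).getD ""
        let pref := pvKeyPrefix split_it
        let md := PySem.Dict.ofList lst.2
        md.keys.foldl (fun fl i => fl ++ [(pref ++ i, vr ++ "=" ++ md.getD i "")]) fl) fl
      = fl ++ data.flatMap pvPairsOf := by
  rw [← PySem.List.foldl_append_eq_flatMap]
  apply PySem.List.foldl_congr_mem
  intro acc lst _
  simp only [pvPairsOf]
  rw [PySem.List.foldl_append_singleton_eq_map]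

-- ===== VERDICT =====
theorem convert_dict_format_py_spec : Claim_equal_convert_dict_format_py := by
  intro data _
  show convert_dict_format_py data = convert_dict_format_py_alt data
  unfold convert_dict_format_py convert_dict_format_py_alt
  rw [pvFlatEq data []]
  simp only [List.nil_append]
  set flat := data.flatMap pvPairsOf with hflat
  -- A's side: relate to the modify-append fold over flat
  have hA := pvOuter data PySem.Dict.empty PySem.Dict.empty rfl (by intro q hq; simp [PySem.Dict.empty] at hq)
  rw [hA.1]
  set G := flat.foldl (fun g p => g.modify p.1 [] (· ++ [p.2])) PySem.Dict.empty with hG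
  -- G's keys, nodup, and per-key value
  have hnd : G.keys.Nodup := by
    exact PySem.Dict.nodup_keys_foldl_modify_key flat Prod.fst [] (fun _ p => (· ++ [p.2]))
      PySem.Dict.empty (by simp [PySem.Dict.keys_empty])
  have hkeys : G.keys = PySem.Set.ofList (flat.map Prod.fst) := by
    rw [hG, PySem.Dict.keys_foldl_modify_key, PySem.Dict.keys_empty]
    rfl
  have hitems := PySem.Dict.items_eq_map_keys G hnd []
  rw [hitems, List.map_map, hkeys]
  -- B's side: the seen loop is Set.ofList (flat.map Prod.fst)
  have hseen : flat.foldl (fun ks (p : String × String) =>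
      if ks.contains p.1 then ks else ks ++ [p.1]) ([] : List String)
      = PySem.Set.ofList (flat.map Prod.fst) := by
    have h1 : PySem.Set.ofList (flat.map Prod.fst)
        = PySem.Set.update ([] : List String) (flat.map Prod.fst) := rfl
    rw [h1, PySem.Set.update_map_eq_foldl_add (f := Prod.fst)]
    simp [PySem.Set.add, PySem.Set.contains]
  rw [hseen]
  apply List.map_congr_left
  intro k _
  simp only [Function.comp, pvJoinGroup]
  rw [hG, PySem.Dict.getD_foldl_modify_append, PySem.Dict.getD_empty, List.nil_append]
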